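-- pv_equiv track=rewrite | github.com/cjfal2/aLGoRiTHM | 백준/Silver/3711. 학번/학번.py | solve
-- ===== SOURCE A (Python) =====
-- def solve(ids):
--     m = 1
--     while 1:
--         remainders = set()
--         is_unique = True
--         for id in ids:
--             remainder = id % m
--             if remainder in remainders:
--                 is_unique = False
--                 break
--             remainders.add(remainder)
--         if is_unique:
--             return m
--         m += 1
-- ===== SOURCE B (Python) =====
-- def solve(ids):
--     diffs = set()
--     rest = ids
--     while rest:
--         a = rest[0]
--         rest = rest[1:]
--         for b in rest:
--             diffs.add(abs(a - b))
--     m = 1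
--     while True:
--         if all(d % m != 0 for d in diffs):
--             return m
--         m += 1
-- ===== Notes on version B (the rewrite author's own statement) =====
-- stated objective: alternative
-- what changed: Instead of rebuilding a remainder set for every candidate modulus, B precomputes the set of pairwise absolute differences once and returns the first m dividing none of them (two ids collide mod m iff m divides their difference).
import Mathlib
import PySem

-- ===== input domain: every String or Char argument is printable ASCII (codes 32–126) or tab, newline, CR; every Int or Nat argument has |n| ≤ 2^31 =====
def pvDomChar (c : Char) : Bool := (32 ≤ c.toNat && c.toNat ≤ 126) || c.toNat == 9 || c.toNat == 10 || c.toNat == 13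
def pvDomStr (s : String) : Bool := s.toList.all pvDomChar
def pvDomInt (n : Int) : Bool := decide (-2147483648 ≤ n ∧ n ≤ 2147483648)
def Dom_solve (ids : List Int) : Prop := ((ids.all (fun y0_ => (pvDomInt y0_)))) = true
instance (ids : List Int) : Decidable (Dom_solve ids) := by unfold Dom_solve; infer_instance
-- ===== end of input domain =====

-- B replaces A's per-modulus remainder-set scan by a precomputed set of pairwise absolute
-- differences, returning the first m that divides none of them (alternative algorithm, same cost class).


-- fuel bound for the Lean rendering of both Pythons' unbounded `while` loop (a totality guard
-- only: for duplicate-free ids the answer is at most (max - min) + 1, so the fuel never runs out)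
def fuelOf (ids : List Int) : Nat :=
  ((ids.foldl max 0) - (ids.foldl min 0)).toNat + 1

-- ===== PORT A =====
-- inner `for id in ids` loop: False on the first repeated remainder, True otherwise
def solveCheck (m : Int) : List Int → PySem.Set Int → Bool
  | [], _ => true
  | id :: rest, remainders =>
    let r := PySem.Int.mod id m
    if PySem.Set.contains remainders r then false
    else solveCheck m rest (PySem.Set.add remainders r)

-- outer `while 1` loop over m (fuel only makes it total; Python has no bound)
def solveLoop (ids : List Int) : Nat → Int → Int
  | 0, m => m
  | fuel + 1, m =>
    if solveCheck m ids PySem.Set.empty then m else solveLoop ids fuel (m + 1)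

def solve (ids : List Int) : Int := solveLoop ids (fuelOf ids) 1

-- ===== PORT B =====
-- `while rest:` loop building the set of pairwise absolute differences
def altDiffs : List Int → PySem.Set Int → PySem.Set Int
  | [], diffs => diffs
  | a :: rest, diffs =>
    altDiffs rest (rest.foldl (fun s b => PySem.Set.add s |a - b|) diffs)

-- `all(d % m != 0 for d in diffs)` (order-independent, so folding the set's list is exact)
def altCheck (m : Int) (diffs : PySem.Set Int) : Bool :=
  diffs.all (fun d => PySem.Int.mod d m != 0)

def altLoop (diffs : PySem.Set Int) : Nat → Int → Int
  | 0, m => m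
  | fuel + 1, m =>
    if altCheck m diffs then m else altLoop diffs fuel (m + 1)

def solve_alt (ids : List Int) : Int :=
  altLoop (altDiffs ids PySem.Set.empty) (fuelOf ids) 1

-- ===== PRECONDITION & SPEC =====
-- No Pre_: the Lean equivalence is unconditional (on duplicate ids both Pythons loop forever
-- and return nothing, so no return value is claimed there; the fuelled ports still agree).
def Spec_solve (ids : List Int) (out : Int) : Prop := out = solve_alt ids
instance (ids : List Int) (out : Int) : Decidable (Spec_solve ids out) := by unfold Spec_solve; infer_instance

-- ===== CLAIM (what is proved, stated in full; the proofs are below) =====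
def Claim_equal_solve : Prop := ∀ (ids : List Int), Dom_solve ids → Spec_solve ids (solve ids)

-- ===== LEMMAS AND PROOFS =====

-- A's inner loop succeeds iff the remainders are pairwise distinct and avoid the accumulator
theorem solveCheck_iff (m : Int) (l : List Int) (rs : PySem.Set Int) :
    solveCheck m l rs = true ↔
      List.Pairwise (fun a b => PySem.Int.mod a m ≠ PySem.Int.mod b m) l ∧
      ∀ x ∈ l, PySem.Int.mod x m ∉ rs := by
  induction l generalizing rs with
  | nil => simp [solveCheck]
  | cons a l ih =>
    simp only [solveCheck, List.pairwise_cons, List.mem_cons]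
    by_cases h : PySem.Int.mod a m ∈ rs
    · rw [show PySem.Set.contains rs (PySem.Int.mod a m) = true from
        (PySem.Set.contains_iff rs _).mpr h]
      simp only [if_true, Bool.false_eq_true, false_iff]
      intro hx
      exact hx.2 _ (Or.inl rfl) h
    · rw [show PySem.Set.contains rs (PySem.Int.mod a m) = false from by
        cases hv : PySem.Set.contains rs (PySem.Int.mod a m)
        · rfl
        · exact absurd ((PySem.Set.contains_iff rs _).mp hv) h]
      simp only [Bool.false_eq_true, if_false, ih]
      constructor
      · rintro ⟨hp, hmem⟩
        refine ⟨⟨fun b hb => ?_, hp⟩, fun x hx => ?_⟩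
        · have := hmem b hb
          rw [PySem.Set.mem_add] at this
          intro he; exact this (Or.inr he.symm)
        · rcases hx with rfl | hx
          · exact h
          · have := hmem x hx
            rw [PySem.Set.mem_add] at this
            exact fun hin => this (Or.inl hin)
      · rintro ⟨⟨hhd, hp⟩, hmem⟩
        refine ⟨hp, fun x hx => ?_⟩
        rw [PySem.Set.mem_add]
        rintro (hin | heq)
        · exact hmem x (Or.inr hx) hin
        · exact hhd x hx heq.symm

-- universally quantified membership over a fold of Set.add
theorem forall_mem_foldl_add {α : Type} [BEq α] [LawfulBEq α] (f : Int → α) (P : α → Prop)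
    (L : List Int) (s : PySem.Set α) :
    (∀ x ∈ L.foldl (fun s b => PySem.Set.add s (f b)) s, P x) ↔
      (∀ x ∈ s, P x) ∧ ∀ b ∈ L, P (f b) := by
  induction L generalizing s with
  | nil => simp
  | cons a L ih =>
    simp only [List.foldl_cons, ih, List.mem_cons]
    constructor
    · rintro ⟨hs, hL⟩
      refine ⟨fun x hx => hs x ((PySem.Set.mem_add s (f a) x).mpr (Or.inl hx)),
        fun b hb => ?_⟩
      rcases hb with rfl | hb
      · exact hs _ ((PySem.Set.mem_add s (f b) (f b)).mpr (Or.inr rfl))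
      · exact hL b hb
    · rintro ⟨hs, hL⟩
      refine ⟨fun x hx => ?_, fun b hb => hL b (Or.inr hb)⟩
      rcases (PySem.Set.mem_add s (f a) x).mp hx with hx | rfl
      · exact hs x hx
      · exact hL a (Or.inl rfl)

-- membership-∀ over the set of pairwise differences
theorem forall_mem_altDiffs (P : Int → Prop) (l : List Int) (s : PySem.Set Int) :
    (∀ x ∈ altDiffs l s, P x) ↔
      (∀ x ∈ s, P x) ∧ List.Pairwise (fun a b => P |a - b|) l := by
  induction l generalizing s with
  | nil => simp [altDiffs]
  | cons a l ih =>
    simp only [altDiffs, ih, forall_mem_foldl_add (fun b => |a - b|) P l s,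
      List.pairwise_cons]
    tauto

-- for a positive modulus, distinct remainders ↔ the difference is not divisible
theorem mod_ne_iff_abs_sub (m a b : Int) (hm : 0 < m) :
    PySem.Int.mod a m ≠ PySem.Int.mod b m ↔ PySem.Int.mod |a - b| m ≠ 0 := by
  rw [PySem.Int.mod_eq_emod_of_pos hm, PySem.Int.mod_eq_emod_of_pos hm,
    PySem.Int.mod_eq_emod_of_pos hm]
  have h1 : a % m = b % m ↔ m ∣ (a - b) := by
    rw [Int.emod_eq_emod_iff_emod_sub_eq_zero]
    exact ⟨Int.dvd_of_emod_eq_zero, Int.emod_eq_zero_of_dvd⟩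
  have h2 : |a - b| % m = 0 ↔ m ∣ (a - b) :=
    ⟨fun hz => (dvd_abs m (a - b)).mp (Int.dvd_of_emod_eq_zero hz),
     fun hd => Int.emod_eq_zero_of_dvd ((dvd_abs m (a - b)).mpr hd)⟩
  exact not_congr (h1.trans h2.symm)

theorem altCheck_iff (m : Int) (diffs : PySem.Set Int) :
    altCheck m diffs = true ↔ ∀ x ∈ diffs, PySem.Int.mod x m ≠ 0 := by
  simp [altCheck, List.all_eq_true]

-- the two per-modulus checks agree for every positive modulus
theorem checks_eq (ids : List Int) (m : Int) (hm : 0 < m) :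
    solveCheck m ids PySem.Set.empty = altCheck m (altDiffs ids PySem.Set.empty) := by
  have hA := solveCheck_iff m ids PySem.Set.empty
  have hB := (altCheck_iff m (altDiffs ids PySem.Set.empty)).trans
    (forall_mem_altDiffs (fun x => PySem.Int.mod x m ≠ 0) ids PySem.Set.empty)
  have hiff : solveCheck m ids PySem.Set.empty = true ↔
      altCheck m (altDiffs ids PySem.Set.empty) = true := by
    rw [hA, hB]
    have hpair : List.Pairwise (fun a b => PySem.Int.mod a m ≠ PySem.Int.mod b m) ids ↔
        List.Pairwise (fun a b => PySem.Int.mod |a - b| m ≠ 0) ids :=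
      List.Pairwise.iff (fun a b => mod_ne_iff_abs_sub m a b hm)
    simp [PySem.Set.empty, hpair]
  cases hx : solveCheck m ids PySem.Set.empty
  · cases hy : altCheck m (altDiffs ids PySem.Set.empty)
    · rfl
    · rw [← hx]; exact hiff.mpr hy
  · exact (hiff.mp hx).symm

theorem loops_eq (ids : List Int) (fuel : Nat) (m : Int) (hm : 0 < m) :
    solveLoop ids fuel m = altLoop (altDiffs ids PySem.Set.empty) fuel m := by
  induction fuel generalizing m with
  | zero => rfl
  | succ fuel ih =>
    simp only [solveLoop, altLoop, checks_eq ids m hm]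
    split
    · rfl
    · exact ih (m + 1) (by omega)

-- ===== VERDICT (by name: the statement is the Claim_ definition above) =====
theorem solve_spec : Claim_equal_solve := by
  intro ids _
  unfold Spec_solve solve solve_alt
  exact loops_eq ids (fuelOf ids) 1 (by omega)
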